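-- pv_equiv track=rewrite | github.com/Aasthaengg/IBMdataset | Python_codes/p02691/s963345715.py | solve
-- ===== SOURCE A (Python) =====
-- def solve(n, a):
--     S, T = {}, {}
--     for i in range(n):
--         b = a[i] + i
--         if not b in S:
--             S[b] = 0
--         S[b] += 1
--
--         c = -a[i] + i
--         if not c in T:
--             T[c] = 0
--         T[c] += 1
--     ans = 0
--     for x, num in S.items():
--         if x in T:
--             ans += S[x] * T[x]
--     return ans
-- ===== SOURCE B (Python) =====
-- def solve(n, a):
--     # Sort both key lists and count equal runs with a two-pointer merge (no dicts).
--     ks = sorted(a[i] + i for i in range(n))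
--     ts = sorted(i - a[i] for i in range(n))
--     ans = 0
--     i = j = 0
--     while i < len(ks) and j < len(ts):
--         u, v = ks[i], ts[j]
--         if u < v:
--             i += 1
--         elif v < u:
--             j += 1
--         else:
--             ci = i
--             while ci < len(ks) and ks[ci] == u:
--                 ci += 1
--             cj = j
--             while cj < len(ts) and ts[cj] == u:
--                 cj += 1
--             ans += (ci - i) * (cj - j)
--             i, j = ci, cj
--     return ans
-- ===== Notes on version B (the rewrite author's own statement) =====
-- stated objective: alternative
-- what changed: Replaces the hash-map counting (two dicts built in one pass, then iterating S's keys with membership tests into T) by a sort-then-merge algorithm: both key lists are sorted and a two-pointer merge multiplies the lengths of equal runs; no dictionary is used at all.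
import Mathlib
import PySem

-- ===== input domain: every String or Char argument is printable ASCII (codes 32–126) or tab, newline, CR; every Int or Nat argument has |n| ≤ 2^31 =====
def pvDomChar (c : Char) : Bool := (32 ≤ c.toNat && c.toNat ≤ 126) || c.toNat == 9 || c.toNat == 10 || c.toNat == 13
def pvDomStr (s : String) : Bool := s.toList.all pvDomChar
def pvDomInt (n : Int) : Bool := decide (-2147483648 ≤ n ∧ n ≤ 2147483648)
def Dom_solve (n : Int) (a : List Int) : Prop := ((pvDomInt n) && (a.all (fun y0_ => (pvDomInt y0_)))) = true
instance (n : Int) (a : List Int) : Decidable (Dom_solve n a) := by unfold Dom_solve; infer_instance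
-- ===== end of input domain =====

-- B replaces A's hash-map counting (two dicts, then key iteration) by sorting both key
-- lists and multiplying equal-run lengths in a two-pointer merge (alternative algorithm);
-- equivalence of the return value is proved on Pre_ (indices in range).

-- ===== PORT A =====
-- a[i] is ported as pyGetD a i 0: Pre_solve guarantees 0 ≤ i < a.length, where pyGetD = a[i] exactly.
def solve (n : Int) (a : List Int) : Int :=
  let st := (PySem.List.pyRange 0 n 1).foldl
    (fun (p : PySem.Dict Int Int × PySem.Dict Int Int) i =>
      let b := PySem.List.pyGetD a i 0 + i
      let S := p.1.setdefault b 0            -- if not b in S: S[b] = 0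
      let S := S.insert b (S.getD b 0 + 1)   -- S[b] += 1
      let c := -(PySem.List.pyGetD a i 0) + i
      let T := p.2.setdefault c 0            -- if not c in T: T[c] = 0
      let T := T.insert c (T.getD c 0 + 1)   -- T[c] += 1
      (S, T))
    (PySem.Dict.empty, PySem.Dict.empty)
  st.1.items.foldl
    (fun ans p =>
      if st.2.contains p.1 then ans + st.1.getD p.1 0 * st.2.getD p.1 0 else ans)
    0

-- ===== PORT B =====
-- The two-pointer merge of Source B: advancing i (resp. j) past an element or a whole equal run
-- is recursion on the suffixes; the inner run-scanning while loops are takeWhile/dropWhile.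
def mergeCount : List Int → List Int → Int
  | [], _ => 0
  | _ :: _, [] => 0
  | u :: us, v :: vs =>
    if u < v then mergeCount us (v :: vs)
    else if v < u then mergeCount (u :: us) vs
    else
      let cu := ((u :: us).takeWhile (· == u)).length   -- ci - i
      let cv := ((v :: vs).takeWhile (· == u)).length   -- cj - j
      (cu : Int) * (cv : Int)
        + mergeCount ((u :: us).dropWhile (· == u)) ((v :: vs).dropWhile (· == u))
  termination_by ks ts => ks.length + ts.length
  decreasing_by
  all_goals
    (try (have h1 : ((u :: us).dropWhile (· == u)).length ≤ us.length := by
            rw [List.dropWhile_cons, if_pos (by simp)]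
            exact List.length_dropWhile_le _ _
          have h2 : ((v :: vs).dropWhile (· == u)).length ≤ (v :: vs).length :=
            List.length_dropWhile_le _ _
          simp only [List.length_cons] at h1 h2 ⊢))
    try simp only [List.length_cons]
    omega

def solve_alt (n : Int) (a : List Int) : Int :=
  let ks := PySem.List.sorted ((PySem.List.pyRange 0 n 1).map
              (fun i => PySem.List.pyGetD a i 0 + i)) (fun x => x) false
  let ts := PySem.List.sorted ((PySem.List.pyRange 0 n 1).map
              (fun i => i - PySem.List.pyGetD a i 0)) (fun x => x) false
  mergeCount ks ts

-- ===== PRECONDITION & SPEC =====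
-- A indexes a[i] for i in range(n): it raises IndexError iff n > len(a) (any n ≤ 0 gives an
-- empty range, and n ≤ 0 ≤ len(a) then holds anyway); so Pre_ is exactly n ≤ len(a).
def Pre_solve (n : Int) (a : List Int) : Prop := n ≤ (a.length : Int)
instance (n : Int) (a : List Int) : Decidable (Pre_solve n a) := by unfold Pre_solve; infer_instance
def pvWitness_solve : Int × List Int := (4, [0, 1, 1, 3])
def Spec_solve (n : Int) (a : List Int) (out : Int) : Prop := out = solve_alt n a
instance (n : Int) (a : List Int) (out : Int) : Decidable (Spec_solve n a out) := by unfold Spec_solve; infer_instance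

-- ===== CLAIM (what is proved, stated in full; the proofs are below) =====
def Claim_equal_solve : Prop := ∀ (n : Int) (a : List Int), Dom_solve n a → Pre_solve n a → Spec_solve n a (solve n a)

-- ===== LEMMAS AND PROOFS =====

-- common value both programs compute: sum over ks of ts.count
def pairSum (ks ts : List Int) : Int := (ks.map (fun x => (ts.count x : Int))).sum

-- A's "setdefault then increment" step is the one-step counter insert.
theorem stepA_eq (d : PySem.Dict Int Int) (k : Int) :
    (d.setdefault k 0).insert k ((d.setdefault k 0).getD k 0 + 1)
      = d.insert k (d.getD k 0 + 1) := by
  by_cases h : d.contains k = true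
  · rw [PySem.Dict.setdefault_of_contains d 0 h]
  · have h' : d.contains k = false := by simpa using h
    rw [PySem.Dict.setdefault_of_not_contains d 0 h', PySem.Dict.getD_insert_self,
      PySem.Dict.insert_insert_self, PySem.Dict.getD_of_not_contains d 0 h']

-- summing (if x = a then g x else 0) over a duplicate-free list containing a gives g a
theorem sum_ite_single (g : Int → Int) (a : Int) (d : List Int) (hd : d.Nodup)
    (ha : a ∈ d) :
    (d.map (fun x => if x = a then g x else 0)).sum = g a := by
  induction d with
  | nil => cases ha
  | cons b d ih =>
    rcases List.mem_cons.mp ha with rfl | ha'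
    · simp only [List.map_cons, List.sum_cons, if_pos]
      have hz : ∀ x ∈ d, (if x = a then g x else 0) = 0 := by
        intro x hx
        have : x ≠ a := fun h => (List.nodup_cons.mp hd).1 (h ▸ hx)
        simp [this]
      rw [List.map_congr_left hz]
      simp
    · have hb : b ≠ a := fun h => (List.nodup_cons.mp hd).1 (h ▸ ha')
      simp only [List.map_cons, List.sum_cons, if_neg hb]
      rw [ih (List.nodup_cons.mp hd).2 ha']
      ring

-- the grouped sum over any duplicate-free superlist of ks equals the plain sum over ks
theorem sum_count_mul (g : Int → Int) (ks : List Int) (d : List Int) (hd : d.Nodup)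
    (hsub : ∀ k ∈ ks, k ∈ d) :
    (d.map (fun x => (ks.count x : Int) * g x)).sum = (ks.map g).sum := by
  induction ks with
  | nil => simp
  | cons a ks ih =>
    have step : ∀ x ∈ d, ((a :: ks).count x : Int) * g x
        = (ks.count x : Int) * g x + (if x = a then g x else 0) := by
      intro x _
      rcases eq_or_ne x a with rfl | hx
      · simp [List.count_cons_self]; ring
      · have : (a :: ks).count x = ks.count x := by
          simp only [List.count_cons]
          have : ¬ (a = x) := fun h => hx h.symm
          simp [this]
        rw [this]
        simp [hx]
    rw [List.map_congr_left step]
    rw [PySem.List.sum_map_add_int d (fun x => (ks.count x : Int) * g x)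
      (fun x => if x = a then g x else 0), ih (fun k hk => hsub k (List.mem_cons_of_mem a hk)),
      sum_ite_single g a d hd (hsub a (List.mem_cons_self)), List.map_cons, List.sum_cons]
    ring

-- pairSum is invariant under permuting either argument
theorem pairSum_perm {ks ks' ts ts' : List Int} (h1 : ks.Perm ks') (h2 : ts.Perm ts') :
    pairSum ks ts = pairSum ks' ts' := by
  unfold pairSum
  have hc : ∀ x : Int, ts.count x = ts'.count x := fun x => h2.count_eq x
  have : ks.map (fun x => (ts.count x : Int)) = ks.map (fun x => (ts'.count x : Int)) := by
    apply List.map_congr_left; intro x _; rw [hc]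
  rw [this]
  exact (h1.map _).sum_eq

-- the merge on sorted lists computes pairSum
theorem mergeCount_eq_pairSum :
    ∀ (ks ts : List Int), ks.Pairwise (· ≤ ·) → ts.Pairwise (· ≤ ·) →
      mergeCount ks ts = pairSum ks ts := by
  intro ks ts
  induction ks, ts using mergeCount.induct with
  | case1 ts => intro _ _; simp [mergeCount, pairSum]
  | case2 u us =>
    intro _ _
    simp [mergeCount, pairSum]
  | case3 u us v vs hlt ih =>
    intro hks hts
    have hcount : (v :: vs).count u = 0 := by
      apply List.count_eq_zero_of_not_mem
      intro hmem
      rcases List.mem_cons.mp hmem with rfl | h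
      · exact absurd hlt (lt_irrefl u)
      · exact absurd (lt_of_lt_of_le hlt ((List.pairwise_cons.mp hts).1 u h)) (lt_irrefl u)
    rw [mergeCount, if_pos hlt, ih (List.pairwise_cons.mp hks).2 hts]
    simp [pairSum, hcount]
  | case4 u us v vs hnlt hlt ih =>
    intro hks hts
    rw [mergeCount, if_neg hnlt, if_pos hlt, ih hks (List.pairwise_cons.mp hts).2]
    unfold pairSum
    apply congrArg List.sum
    apply List.map_congr_left
    intro x hx
    have hux : u ≤ x := by
      rcases List.mem_cons.mp hx with rfl | h
      · exact le_refl x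
      · exact (List.pairwise_cons.mp hks).1 x h
    have : (v :: vs).count x = vs.count x := by
      rw [List.count_cons]
      have : ¬ (v = x) := fun h => absurd (lt_of_lt_of_le hlt (h ▸ hux)) (lt_irrefl v)
      simp [this]
    rw [this]
  | case5 u us v vs hnlt hnlt' ih =>
    intro hks hts
    have huv : u = v := le_antisymm (le_of_not_gt hnlt') (le_of_not_gt hnlt)
    subst huv
    rw [mergeCount, if_neg hnlt, if_neg hnlt']
    -- split both lists into the equal run and the strict remainder
    have hsplitK := List.takeWhile_append_dropWhile (p := (· == u)) (l := u :: us)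
    have hsplitT := List.takeWhile_append_dropWhile (p := (· == u)) (l := u :: vs)
    have htkEq : ∀ x ∈ (u :: us).takeWhile (· == u), x = u := by
      intro x hx; simpa using List.mem_takeWhile_imp hx
    have httEq : ∀ x ∈ (u :: vs).takeWhile (· == u), x = u := by
      intro x hx; simpa using List.mem_takeWhile_imp hx
    -- every element of a dropWhile (== u) of a sorted u-headed list is > u
    have hgt0 : ∀ (l : List Int), l.Pairwise (· ≤ ·) → (∀ y ∈ l, u ≤ y) →
        ∀ x ∈ l.dropWhile (· == u), u < x := by
      intro l
      induction l with
      | nil => intro _ _ x hx; cases hx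
      | cons b bs ih =>
        intro hpl hlb x hx
        by_cases hb : b = u
        · subst hb
          rw [List.dropWhile_cons, if_pos (by simp)] at hx
          exact ih (List.pairwise_cons.mp hpl).2
            (fun y hy => (hlb y (List.mem_cons_of_mem b hy))) x hx
        · rw [List.dropWhile_cons, if_neg (by simpa using hb)] at hx
          have hub : u < b := lt_of_le_of_ne (hlb b List.mem_cons_self) (Ne.symm hb)
          rcases List.mem_cons.mp hx with rfl | h
          · exact hub
          · exact lt_of_lt_of_le hub ((List.pairwise_cons.mp hpl).1 x h)
    have hgt : ∀ (l : List Int), (u :: l).Pairwise (· ≤ ·) →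
        ∀ x ∈ (u :: l).dropWhile (· == u), u < x := by
      intro l hl
      exact hgt0 (u :: l) hl (by
        intro y hy
        rcases List.mem_cons.mp hy with rfl | h
        · exact le_refl y
        · exact (List.pairwise_cons.mp hl).1 y h)
    have hgtK := hgt us hks
    have hgtT := hgt vs hts
    -- count of u in the ts run / remainder
    have hcntRunT : ((u :: vs).takeWhile (· == u)).count u
        = ((u :: vs).takeWhile (· == u)).length := by
      apply List.count_eq_length.mpr
      intro x hx; exact (httEq x hx).symm
    have hcntRemT : ((u :: vs).dropWhile (· == u)).count u = 0 := by
      apply List.count_eq_zero_of_not_mem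
      intro h; exact absurd (hgtT u h) (lt_irrefl u)
    have ihv := ih ((hks.sublist (List.dropWhile_sublist (l := u :: us) (p := (· == u)))))
      ((hts.sublist (List.dropWhile_sublist (l := u :: vs) (p := (· == u)))))
    rw [ihv]
    -- now compute pairSum (u::us) (u::vs) by splitting ks into run ++ remainder
    have hps : pairSum (u :: us) (u :: vs)
        = pairSum ((u :: us).takeWhile (· == u)) (u :: vs)
          + pairSum ((u :: us).dropWhile (· == u)) (u :: vs) := by
      unfold pairSum
      conv_lhs => rw [← hsplitK]
      rw [List.map_append, List.sum_append]
    rw [hps]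
    -- run part: each of the cu elements counts to cv
    have hrun : pairSum ((u :: us).takeWhile (· == u)) (u :: vs)
        = (((u :: us).takeWhile (· == u)).length : Int)
            * (((u :: vs).takeWhile (· == u)).length : Int) := by
      unfold pairSum
      have : ((u :: us).takeWhile (· == u)).map (fun x => ((u :: vs).count x : Int))
          = ((u :: us).takeWhile (· == u)).map
              (fun _ => (((u :: vs).takeWhile (· == u)).length : Int)) := by
        apply List.map_congr_left
        intro x hx
        rw [htkEq x hx]
        conv_lhs => rw [← hsplitT]
        rw [List.count_append, hcntRunT, hcntRemT]
        simp
      rw [this, List.map_const', List.sum_replicate, nsmul_eq_mul]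
    -- remainder part: counts only hit the ts remainder
    have hrem : pairSum ((u :: us).dropWhile (· == u)) (u :: vs)
        = pairSum ((u :: us).dropWhile (· == u)) ((u :: vs).dropWhile (· == u)) := by
      unfold pairSum
      apply congrArg List.sum
      apply List.map_congr_left
      intro x hx
      have hxu : u < x := hgtK x hx
      conv_lhs => rw [← hsplitT]
      rw [List.count_append]
      have : ((u :: vs).takeWhile (· == u)).count x = 0 := by
        apply List.count_eq_zero_of_not_mem
        intro h
        exact absurd (httEq x h ▸ hxu) (lt_irrefl u)
      rw [this]
      simp
    rw [hrun, hrem]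
    try ring

theorem solve_eq (n : Int) (a : List Int) : solve n a = solve_alt n a := by
  unfold solve solve_alt
  simp only []
  set r := PySem.List.pyRange 0 n 1 with hr
  set ks := r.map (fun i => PySem.List.pyGetD a i 0 + i) with hks
  set ts := r.map (fun i => -(PySem.List.pyGetD a i 0) + i) with hts
  -- A's pair-fold is (counter ks, counter ts)
  have hfold :
      r.foldl
        (fun (p : PySem.Dict Int Int × PySem.Dict Int Int) i =>
          let b := PySem.List.pyGetD a i 0 + i
          let S := p.1.setdefault b 0
          let S := S.insert b (S.getD b 0 + 1)
          let c := -(PySem.List.pyGetD a i 0) + i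
          let T := p.2.setdefault c 0
          let T := T.insert c (T.getD c 0 + 1)
          (S, T))
        (PySem.Dict.empty, PySem.Dict.empty)
      = (PySem.Dict.counter ks, PySem.Dict.counter ts) := by
    have hstep :
        (fun (p : PySem.Dict Int Int × PySem.Dict Int Int) i =>
          let b := PySem.List.pyGetD a i 0 + i
          let S := p.1.setdefault b 0
          let S := S.insert b (S.getD b 0 + 1)
          let c := -(PySem.List.pyGetD a i 0) + i
          let T := p.2.setdefault c 0
          let T := T.insert c (T.getD c 0 + 1)
          (S, T))
        = (fun (p : PySem.Dict Int Int × PySem.Dict Int Int) (i : Int) =>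
            (p.1.insert (PySem.List.pyGetD a i 0 + i)
               (p.1.getD (PySem.List.pyGetD a i 0 + i) 0 + 1),
             p.2.insert (-(PySem.List.pyGetD a i 0) + i)
               (p.2.getD (-(PySem.List.pyGetD a i 0) + i) 0 + 1))) := by
      funext p i
      simp only [stepA_eq]
    rw [hstep]
    refine (PySem.List.foldl_prod_mk
      (fun (d : PySem.Dict Int Int) (i : Int) =>
        d.insert (PySem.List.pyGetD a i 0 + i)
          (d.getD (PySem.List.pyGetD a i 0 + i) 0 + 1))
      (fun (d : PySem.Dict Int Int) (i : Int) =>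
        d.insert (-(PySem.List.pyGetD a i 0) + i)
          (d.getD (-(PySem.List.pyGetD a i 0) + i) 0 + 1))
      r PySem.Dict.empty PySem.Dict.empty).trans ?_
    refine Prod.ext ?_ ?_
    · exact (List.foldl_map (f := fun i => PySem.List.pyGetD a i 0 + i)
          (g := fun (d : PySem.Dict Int Int) x => d.insert x (d.getD x 0 + 1))
          (l := r) (init := PySem.Dict.empty)).symm.trans
        (PySem.Dict.foldl_insert_getD_add_one_eq_counter ks)
    · exact (List.foldl_map (f := fun i => -(PySem.List.pyGetD a i 0) + i)
          (g := fun (d : PySem.Dict Int Int) x => d.insert x (d.getD x 0 + 1))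
          (l := r) (init := PySem.Dict.empty)).symm.trans
        (PySem.Dict.foldl_insert_getD_add_one_eq_counter ts)
  rw [hfold]
  -- reduce A's answer fold to the grouped sum over the distinct keys of ks
  have hA :
      (PySem.Dict.counter ks).items.foldl
        (fun ans p =>
          if (PySem.Dict.counter ts).contains p.1 then
            ans + (PySem.Dict.counter ks).getD p.1 0 * (PySem.Dict.counter ts).getD p.1 0
          else ans) 0
      = ((PySem.Set.ofList ks : List Int).map
          (fun x => (ks.count x : Int) * (ts.count x : Int))).sum := by
    have hstep :
        (fun (ans : Int) (p : Int × Int) =>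
          if (PySem.Dict.counter ts).contains p.1 then
            ans + (PySem.Dict.counter ks).getD p.1 0 * (PySem.Dict.counter ts).getD p.1 0
          else ans)
        = (fun ans p =>
            ans + (if (PySem.Dict.counter ts).contains p.1 then
              (PySem.Dict.counter ks).getD p.1 0 * (PySem.Dict.counter ts).getD p.1 0
            else 0)) := by
      funext ans p; split_ifs <;> simp
    rw [hstep, PySem.List.foldl_add, PySem.Dict.items_counter, List.map_map, zero_add]
    apply congrArg List.sum
    apply List.map_congr_left
    intro x hx
    simp only [Function.comp_apply, PySem.Dict.contains_counter, PySem.Dict.getD_counter]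
    by_cases hxt : x ∈ ts
    · simp [hxt]
    · simp [hxt, List.count_eq_zero_of_not_mem hxt]
  rw [hA]
  -- A's grouped sum = pairSum ks ts
  have hmain := sum_count_mul (fun x => (ts.count x : Int)) ks
    (PySem.Set.ofList ks : List Int)
    (by rw [← PySem.List.dedup_eq_ofList]; exact PySem.List.nodup_dedup ks)
    (by intro k hk; rw [← PySem.List.dedup_eq_ofList]; exact (PySem.List.mem_dedup ks k).mpr hk)
  rw [hmain]
  -- B's key lists: ts' (with i - a[i]) equals ts elementwise
  have hmapeq : r.map (fun i => i - PySem.List.pyGetD a i 0) = ts := by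
    rw [hts]; apply List.map_congr_left; intro i _; ring
  rw [hmapeq]
  -- B's merge on the sorted lists = pairSum of the sorted lists = pairSum ks ts
  rw [mergeCount_eq_pairSum _ _
      (by simpa using PySem.List.sorted_pairwise (xs := ks) (key := fun x : Int => x))
      (by simpa using PySem.List.sorted_pairwise (xs := ts) (key := fun x : Int => x))]
  exact (pairSum_perm (PySem.List.sorted_perm ks (fun x => x) false)
    (PySem.List.sorted_perm ts (fun x => x) false)).symm

-- ===== VERDICT (by name: the statement is the Claim_ definition above) =====
theorem solve_spec : Claim_equal_solve := by
  intro n a _ _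
  unfold Spec_solve
  exact solve_eq n a
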